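-- pv_equiv track=rewrite | github.com/SpeckledFleebeedoo/AdventOfCode2022 | day25/day25.py | decodeSNAFU
-- ===== SOURCE A (Python) =====
-- def decodeSNAFU(num:str):
--     charmap = {"2": 2,
--                "1": 1,
--                "0": 0,
--                "-": -1,
--                "=": -2}
--     value = 0
--     for i, char in enumerate(num[::-1]):
--         magnitude = 5**i
--         value += (magnitude * charmap[char])
--     return value
-- ===== SOURCE B (Python) =====
-- def decodeSNAFU(num: str):
--     charmap = {"2": 2,
--                "1": 1,
--                "0": 0,
--                "-": -1,
--                "=": -2}
--     value = 0
--     for char in num: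
--         value = value * 5 + charmap[char]
--     return value
-- ===== Notes on version B (the rewrite author's own statement) =====
-- stated objective: idiomatic
-- what changed: Replaces the reversed-enumerate loop with per-digit 5**i powers by Horner's multiply-accumulate over the string in forward order.
import Mathlib
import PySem

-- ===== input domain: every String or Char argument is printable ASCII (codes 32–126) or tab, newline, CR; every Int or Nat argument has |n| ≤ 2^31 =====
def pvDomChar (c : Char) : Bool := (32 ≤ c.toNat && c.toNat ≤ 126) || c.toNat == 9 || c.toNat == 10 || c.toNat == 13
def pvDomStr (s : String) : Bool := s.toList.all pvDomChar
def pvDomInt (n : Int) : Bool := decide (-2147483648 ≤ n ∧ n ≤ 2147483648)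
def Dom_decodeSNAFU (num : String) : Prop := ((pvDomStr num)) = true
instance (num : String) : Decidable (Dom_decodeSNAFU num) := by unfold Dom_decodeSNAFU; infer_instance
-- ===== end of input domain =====

-- B replaces the reversed-enumerate loop with 5**i powers by Horner's forward multiply-accumulate (idiomatic; same values).

-- the charmap dict shared by both Pythons
def pvCharmap : PySem.Dict Char Int :=
  ((((PySem.Dict.empty.insert '2' 2).insert '1' 1).insert '0' 0).insert '-' (-1)).insert '=' (-2)

-- ===== PORT A =====
-- for i, char in enumerate(num[::-1]): value += 5**i * charmap[char]
-- i from enumerate is a nonnegative Int; 5**i is ported as 5 ^ i.toNat (exact since i ≥ 0).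
-- charmap[char] raises KeyError for other chars; Pre_ excludes those, getD's default is unreachable inside Pre_.
def decodeSNAFU (num : String) : Int :=
  (PySem.List.enumerate num.toList.reverse).foldl
    (fun value p => value + 5 ^ p.1.toNat * (pvCharmap.getD p.2 0)) 0

-- ===== PORT B =====
-- for char in num: value = value * 5 + charmap[char]
def decodeSNAFU_alt (num : String) : Int :=
  num.toList.foldl (fun value char => value * 5 + pvCharmap.getD char 0) 0

-- ===== PRECONDITION & SPEC =====
-- A raises KeyError on any character outside "210-="; exactly those inputs are excluded.
def Pre_decodeSNAFU (num : String) : Prop :=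
  num.toList.all (fun c => c == '2' || c == '1' || c == '0' || c == '-' || c == '=') = true
instance (num : String) : Decidable (Pre_decodeSNAFU num) := by unfold Pre_decodeSNAFU; infer_instance
def pvWitness_decodeSNAFU : String := "2=-01"

def Spec_decodeSNAFU (num : String) (out : Int) : Prop := out = decodeSNAFU_alt num
instance (num : String) (out : Int) : Decidable (Spec_decodeSNAFU num out) := by unfold Spec_decodeSNAFU; infer_instance

-- ===== CLAIM (what is proved, stated in full; the proofs are below) =====
def Claim_equal_decodeSNAFU : Prop := ∀ (num : String), Dom_decodeSNAFU num → Pre_decodeSNAFU num → Spec_decodeSNAFU num (decodeSNAFU num)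

-- ===== LEMMAS AND PROOFS =====

-- A's fold, as a sum over the enumerated reversed list
def pvSumRev (l : List Char) : Int :=
  ((PySem.List.enumerate l).map (fun p => 5 ^ p.1.toNat * (pvCharmap.getD p.2 0))).sum

theorem pvA_eq_sumRev (num : String) : decodeSNAFU num = pvSumRev num.toList.reverse := by
  unfold decodeSNAFU pvSumRev
  rw [PySem.List.foldl_add]
  simp

theorem pvEnum_shift (l : List Char) (s : Int) :
    ((PySem.List.enumerate l (s + 1)).map (fun p => 5 ^ p.1.toNat * (pvCharmap.getD p.2 0))).sum
    = ((PySem.List.enumerate l s).map (fun p => 5 ^ (p.1 + 1).toNat * (pvCharmap.getD p.2 0))).sum := by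
  induction l generalizing s with
  | nil => simp [PySem.List.enumerate_nil]
  | cons c t ih =>
      rw [PySem.List.enumerate_cons, PySem.List.enumerate_cons]
      simp only [List.map_cons, List.sum_cons]
      rw [ih (s + 1)]

theorem pvSumRev_cons (c : Char) (l : List Char) :
    pvSumRev (c :: l) = pvCharmap.getD c 0 + 5 * pvSumRev l := by
  unfold pvSumRev
  rw [PySem.List.enumerate_cons]
  simp only [List.map_cons, List.sum_cons]
  rw [pvEnum_shift l 0]
  have : ∀ t : List Char,
      ((PySem.List.enumerate t 0).map (fun p => 5 ^ (p.1 + 1).toNat * (pvCharmap.getD p.2 0))).sum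
      = 5 * ((PySem.List.enumerate t 0).map (fun p => 5 ^ p.1.toNat * (pvCharmap.getD p.2 0))).sum := by
    intro t
    rw [Int.mul_comm, ← List.sum_map_mul_right]
    apply congrArg List.sum
    apply List.map_congr_left
    intro p hp
    have h0 : 0 ≤ p.1 := by
      rcases (PySem.List.mem_enumerate_iff _ _ _).1 hp with ⟨k, hk, rfl⟩
      simp
    have : (p.1 + 1).toNat = p.1.toNat + 1 := by omega
    rw [this, pow_succ]
    ring
  rw [this]
  norm_num

theorem pvHorner_rev (l : List Char) :
    l.foldl (fun value char => value * 5 + pvCharmap.getD char 0) 0 = pvSumRev l.reverse := by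
  induction l using List.reverseRecOn with
  | nil => simp [pvSumRev, PySem.List.enumerate_nil]
  | append_singleton t c ih =>
      rw [List.foldl_append, List.reverse_append]
      simp only [List.foldl_cons, List.foldl_nil, List.reverse_singleton, List.singleton_append]
      rw [pvSumRev_cons, ← ih]
      ring

-- ===== VERDICT (by name: the statement is the Claim_ definition above) =====
theorem decodeSNAFU_spec : Claim_equal_decodeSNAFU := by
  intro num _ _
  unfold Spec_decodeSNAFU decodeSNAFU_alt
  rw [pvA_eq_sumRev, pvHorner_rev]
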